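-- pv_equiv track=rewrite | github.com/JOHNNY-fans/KG-o1 | src/Subgraph_Selection/data_loader.py | build_index_structures
-- ===== SOURCE A (Python) =====
-- def build_index_structures(triples):
--     node2rel_in, node2rel_out = {}, {}
--     rel2triple, headrel2tail, tailrel2head = {}, {}, {}
--
--     for head, r, tail in triples:
--         node2rel_out.setdefault(head, []).append(r)
--         node2rel_in.setdefault(tail, []).append(r)
--         rel2triple.setdefault(r, []).append([head, tail])
--         headrel2tail.setdefault((head, r), []).append(tail)
--         tailrel2head.setdefault((tail, r), []).append(head)
--
--     return node2rel_in, node2rel_out, rel2triple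
-- ===== SOURCE B (Python) =====
-- def build_index_structures(triples):
--     ts = list(triples)
--
--     def group(key, value):
--         keys = list(dict.fromkeys(key(t) for t in ts))
--         return {k: [value(t) for t in ts if key(t) == k] for k in keys}
--
--     node2rel_in = group(lambda t: t[2], lambda t: t[1])
--     node2rel_out = group(lambda t: t[0], lambda t: t[1])
--     rel2triple = group(lambda t: t[1], lambda t: [t[0], t[2]])
--     return node2rel_in, node2rel_out, rel2triple
-- ===== Notes on version B (the rewrite author's own statement) =====
-- stated objective: alternative
-- what changed: Replaces the fused five-dict setdefault/append loop by a column-oriented scheme: for each of the three returned indexes, dedup that key column with dict.fromkeys and build each group by filtering the triple list per key (no mutated dicts, O(n*k) scans instead of one fused pass), dropping the two unused dicts.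
import Mathlib
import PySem

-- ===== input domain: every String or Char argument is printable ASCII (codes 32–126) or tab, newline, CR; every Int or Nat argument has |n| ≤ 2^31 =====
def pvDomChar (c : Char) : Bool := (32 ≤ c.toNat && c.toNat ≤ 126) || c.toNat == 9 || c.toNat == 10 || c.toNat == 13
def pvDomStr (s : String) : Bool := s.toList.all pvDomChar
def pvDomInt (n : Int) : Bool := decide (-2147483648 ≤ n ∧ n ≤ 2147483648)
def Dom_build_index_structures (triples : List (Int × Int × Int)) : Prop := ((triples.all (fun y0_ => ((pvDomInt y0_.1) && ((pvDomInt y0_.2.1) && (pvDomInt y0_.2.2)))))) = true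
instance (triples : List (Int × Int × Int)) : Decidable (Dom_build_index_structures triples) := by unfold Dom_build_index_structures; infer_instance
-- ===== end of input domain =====

-- B replaces A's fused five-dict setdefault loop by a column-oriented scheme: per returned
-- index, dedup the key column (dict.fromkeys) and build each group by filtering the triple
-- list per key; no mutated dicts, the two unused dicts are dropped; objective: alternative.


-- ===== PORT A =====
-- A: one fused loop over the triples maintaining five dicts
-- (node2rel_in, node2rel_out, rel2triple, headrel2tail, tailrel2head);
-- `d.setdefault(k, []).append(v)` is `d.modify k [] (· ++ [v])`.
def build_index_structures (triples : List (Int × Int × Int)) : (List (Int × List Int)) × (List (Int × List Int)) × (List (Int × List (List Int))) :=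
  let st := triples.foldl
    (fun st p =>
      let head := p.1; let r := p.2.1; let tail := p.2.2
      (st.1.modify tail [] (· ++ [r]),
       st.2.1.modify head [] (· ++ [r]),
       st.2.2.1.modify r [] (· ++ [[head, tail]]),
       st.2.2.2.1.modify (head, r) [] (· ++ [tail]),
       st.2.2.2.2.modify (tail, r) [] (· ++ [head])))
    ((PySem.Dict.empty : PySem.Dict Int (List Int)),
     (PySem.Dict.empty : PySem.Dict Int (List Int)),
     (PySem.Dict.empty : PySem.Dict Int (List (List Int))),
     (PySem.Dict.empty : PySem.Dict (Int × Int) (List Int)),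
     (PySem.Dict.empty : PySem.Dict (Int × Int) (List Int)))
  (st.1.items, st.2.1.items, st.2.2.1.items)

-- ===== PORT B =====
-- B's helper `group(key, value)`: dedup the key column (list(dict.fromkeys(...)) is
-- PySem.List.dedup), then the dict comprehension over those distinct keys — its items
-- list is exactly the map below, one filtering scan of ts per key.
def pvGroup {ν : Type} (key : (Int × Int × Int) → Int) (val : (Int × Int × Int) → ν)
    (ts : List (Int × Int × Int)) : List (Int × List ν) :=
  (PySem.List.dedup (ts.map key)).map
    (fun k => (k, (ts.filter (fun t => key t == k)).map val))

def build_index_structures_alt (triples : List (Int × Int × Int)) : (List (Int × List Int)) × (List (Int × List Int)) × (List (Int × List (List Int))) :=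
  (pvGroup (fun t => t.2.2) (fun t => t.2.1) triples,
   pvGroup (fun t => t.1) (fun t => t.2.1) triples,
   pvGroup (fun t => t.2.1) (fun t => [t.1, t.2.2]) triples)

-- ===== PRECONDITION & SPEC =====
def Spec_build_index_structures (triples : List (Int × Int × Int)) (out : (List (Int × List Int)) × (List (Int × List Int)) × (List (Int × List (List Int)))) : Prop := out = build_index_structures_alt triples
instance (triples : List (Int × Int × Int)) (out : (List (Int × List Int)) × (List (Int × List Int)) × (List (Int × List (List Int)))) : Decidable (Spec_build_index_structures triples out) := by unfold Spec_build_index_structures; infer_instance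

-- ===== CLAIM (what is proved, stated in full; the proofs are below) =====
def Claim_equal_build_index_structures : Prop := ∀ (triples : List (Int × Int × Int)), Dom_build_index_structures triples → Spec_build_index_structures triples (build_index_structures triples)

-- ===== LEMMAS AND PROOFS =====

-- A dict with Nodup keys is its key list paired with its lookups.
theorem items_eq_keys_map {κ ν : Type} [BEq κ] [LawfulBEq κ] (d : PySem.Dict κ ν) (v0 : ν)
    (h : d.keys.Nodup) : d.items = d.keys.map (fun k => (k, d.getD k v0)) := by
  simp only [PySem.Dict.keys, List.map_map]
  conv_lhs => rw [← List.map_id d.items]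
  apply List.map_congr_left
  intro p hp
  obtain ⟨k, v⟩ := p
  simp only [Function.comp, id]
  rw [PySem.Dict.getD_of_mem_items d hp h v0]

-- A's grouping fold from the empty dict, characterised: its items are the deduped key
-- column, each key paired with the filtered value column.
theorem grouped_items {ν : Type} (key : (Int × Int × Int) → Int) (val : (Int × Int × Int) → ν)
    (ts : List (Int × Int × Int)) :
    (ts.foldl (fun d t => d.modify (key t) [] (· ++ [val t])) (PySem.Dict.empty : PySem.Dict Int (List ν))).items
      = pvGroup key val ts := by
  set D := ts.foldl (fun d t => d.modify (key t) [] (· ++ [val t])) (PySem.Dict.empty : PySem.Dict Int (List ν)) with hD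
  have hn : D.keys.Nodup := by
    exact PySem.Dict.nodup_keys_foldl_modify_key ts key [] (fun d t => (· ++ [val t])) _ PySem.Dict.nodup_keys_empty
  have hkeys : D.keys = PySem.List.dedup (ts.map key) := by
    rw [hD, PySem.Dict.keys_foldl_modify_key, PySem.Dict.keys_empty, PySem.List.dedup_eq_ofList,
        PySem.Set.update, PySem.Set.ofList_eq_foldl]
  have hget : ∀ c, D.getD c [] = (ts.filter (fun t => key t == c)).map val := by
    intro c
    have hfold : D = (ts.map (fun t => (key t, val t))).foldl
        (fun d p => d.modify p.1 [] (· ++ [p.2])) PySem.Dict.empty := by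
      rw [hD, List.foldl_map]
    rw [hfold, PySem.Dict.getD_foldl_modify_append, PySem.Dict.getD_empty]
    simp [List.filter_map, List.map_map, Function.comp_def]
  rw [items_eq_keys_map D [] hn, hkeys, pvGroup]
  exact List.map_congr_left (fun k _ => by rw [hget k])

-- A's fused fold over the five-dict state is componentwise the five independent folds.
theorem fused_fold_split (l : List (Int × Int × Int))
    (s1 s2 : PySem.Dict Int (List Int)) (s3 : PySem.Dict Int (List (List Int)))
    (s4 s5 : PySem.Dict (Int × Int) (List Int)) :
    l.foldl
      (fun st p =>
        let head := p.1; let r := p.2.1; let tail := p.2.2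
        (st.1.modify tail [] (· ++ [r]),
         st.2.1.modify head [] (· ++ [r]),
         st.2.2.1.modify r [] (· ++ [[head, tail]]),
         st.2.2.2.1.modify (head, r) [] (· ++ [tail]),
         st.2.2.2.2.modify (tail, r) [] (· ++ [head])))
      (s1, s2, s3, s4, s5)
    = (l.foldl (fun d t => d.modify t.2.2 [] (· ++ [t.2.1])) s1,
       l.foldl (fun d t => d.modify t.1 [] (· ++ [t.2.1])) s2,
       l.foldl (fun d t => d.modify t.2.1 [] (· ++ [[t.1, t.2.2]])) s3,
       l.foldl (fun d t => d.modify (t.1, t.2.1) [] (· ++ [t.2.2])) s4,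
       l.foldl (fun d t => d.modify (t.2.2, t.2.1) [] (· ++ [t.1])) s5) := by
  induction l generalizing s1 s2 s3 s4 s5 with
  | nil => rfl
  | cons hd tl ih => simpa [List.foldl_cons] using ih _ _ _ _ _

-- ===== VERDICT (by name: the statement is the Claim_ definition above) =====
theorem build_index_structures_spec : Claim_equal_build_index_structures := by
  intro triples _
  unfold Spec_build_index_structures build_index_structures build_index_structures_alt
  simp only [fused_fold_split]
  exact congrArg₂ _ (grouped_items _ _ _) (congrArg₂ _ (grouped_items _ _ _) (grouped_items _ _ _))
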